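-- pv_equiv track=rewrite | github.com/CS779-Research-Project/tabular_qa | baseline_pyagent_sc_lite.py | extract_from_nth_action_input
-- ===== SOURCE A (Python) =====
-- def extract_from_nth_action_input(text, n):
--     # Split the input text into lines
--     lines = text.splitlines()
--
--     # Initialize a counter to track occurrences of "Action Input:"
--     action_input_count = 0
--
--     # Flag to start collecting lines after the nth occurrence of "Action Input:"
--     collecting = True
--     action_input_spotted = False
--
--     # List to hold lines from the nth "Action Input:" to the line before "Observation"
--     extracted_lines = []
--
--     for line in lines:
--         # Check if the line starts with "Action Input:"
--         if line.startswith("Action Input:"):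
--             action_input_count += 1
--
--             # Start collecting lines after reaching the nth "Action Input:"
--             if action_input_count == n:
--                 action_input_spotted = True
--
--         # Stop collecting lines at the next "Observation" line
--         if collecting:
--             if line.startswith("Observation") and action_input_spotted:
--                 break
--             extracted_lines.append(line)
--
--     # Join the extracted lines back into a single string
--     extracted_text = "\n".join(extracted_lines)
--
--     return extracted_text
-- ===== SOURCE B (Python) =====
-- def extract_from_nth_action_input(text, n):
--     lines = text.splitlines()
--
--     # Locate the index of the nth "Action Input:" line (None if n < 1 or absent).
--     idx_n = None
--     if n >= 1:
--         count = 0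
--         for i, line in enumerate(lines):
--             if line.startswith("Action Input:"):
--                 count += 1
--                 if count == n:
--                     idx_n = i
--                     break
--
--     # Boundary: first "Observation" line at or after idx_n; else end of text.
--     j = len(lines)
--     if idx_n is not None:
--         for k in range(idx_n, len(lines)):
--             if lines[k].startswith("Observation"):
--                 j = k
--                 break
--
--     return "\n".join(lines[:j])
-- ===== Notes on version B (the rewrite author's own statement) =====
-- stated objective: alternative
-- what changed: Replaced the flag-threaded accumulate-and-break loop with a locate-boundary-then-slice structure: find the index of the nth 'Action Input:' line, find the first 'Observation' line at or after it, and join the prefix of lines up to that boundary.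
import Mathlib
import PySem

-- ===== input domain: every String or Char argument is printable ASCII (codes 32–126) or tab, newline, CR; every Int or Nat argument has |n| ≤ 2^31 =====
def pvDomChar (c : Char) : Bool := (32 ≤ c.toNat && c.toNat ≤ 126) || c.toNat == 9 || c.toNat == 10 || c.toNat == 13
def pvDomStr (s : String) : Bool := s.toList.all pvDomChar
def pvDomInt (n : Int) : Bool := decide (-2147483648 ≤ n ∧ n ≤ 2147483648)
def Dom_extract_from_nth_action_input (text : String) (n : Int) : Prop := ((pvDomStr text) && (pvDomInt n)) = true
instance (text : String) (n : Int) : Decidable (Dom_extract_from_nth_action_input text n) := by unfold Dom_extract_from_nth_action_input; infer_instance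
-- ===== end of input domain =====

-- B replaces A's flag-threaded accumulate/break loop by locate-the-boundary-then-slice (alternative decomposition, same cost).

-- ===== PORT A =====
-- A's single for-loop: state = (count, spotted, accumulated lines); break returns the accumulator.
def pvAILoop (n : Int) (lines : List String) (count : Int) (spotted : Bool) (acc : List String) : List String :=
  match lines with
  | [] => acc.reverse
  | l :: rest =>
    let count' := if PySem.Str.startswith l "Action Input:" then count + 1 else count
    let spotted' := if PySem.Str.startswith l "Action Input:" && (count' == n) then true else spotted
    if PySem.Str.startswith l "Observation" && spotted' then acc.reverse
    else pvAILoop n rest count' spotted' (l :: acc)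

def extract_from_nth_action_input (text : String) (n : Int) : String :=
  PySem.Str.join "\n" (pvAILoop n (PySem.Str.splitlines text) 0 false [])

-- ===== PORT B =====
-- Source B's first loop: index of the nth "Action Input:" line (counting upward from `count`).
def pvFindNth (n : Int) (lines : List String) (count : Int) : Option Nat :=
  match lines with
  | [] => none
  | l :: rest =>
    if PySem.Str.startswith l "Action Input:" then
      if count + 1 == n then some 0 else (pvFindNth n rest (count + 1)).map (· + 1)
    else (pvFindNth n rest count).map (· + 1)

-- Source B's second loop: offset of the first "Observation" line (length if none).
def pvFindObs : List String → Nat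
  | [] => 0
  | l :: rest => if PySem.Str.startswith l "Observation" then 0 else pvFindObs rest + 1

def extract_from_nth_action_input_alt (text : String) (n : Int) : String :=
  let lines := PySem.Str.splitlines text
  let idx := if 1 ≤ n then pvFindNth n lines 0 else none
  let j := match idx with
    | none => lines.length
    | some i => i + pvFindObs (lines.drop i)
  PySem.Str.join "\n" (lines.take j)

-- ===== PRECONDITION & SPEC =====
def Spec_extract_from_nth_action_input (text : String) (n : Int) (out : String) : Prop := out = extract_from_nth_action_input_alt text n
instance (text : String) (n : Int) (out : String) : Decidable (Spec_extract_from_nth_action_input text n out) := by unfold Spec_extract_from_nth_action_input; infer_instance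

-- ===== CLAIM (what is proved, stated in full; the proofs are below) =====
def Claim_equal_extract_from_nth_action_input : Prop := ∀ (text : String) (n : Int), Dom_extract_from_nth_action_input text n → Spec_extract_from_nth_action_input text n (extract_from_nth_action_input text n)

-- ===== LEMMAS AND PROOFS =====

-- A line starting with "Action Input:" cannot start with "Observation".
theorem pv_ai_not_obs (cs : List Char) (h : PySem.Chars.startswith cs ['A', 'c', 't', 'i', 'o', 'n', ' ', 'I', 'n', 'p', 'u', 't', ':'] = true) :
    PySem.Chars.startswith cs ['O', 'b', 's', 'e', 'r', 'v', 'a', 't', 'i', 'o', 'n'] = false := by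
  rw [PySem.Chars.startswith_iff] at h
  by_contra hO
  rw [Bool.not_eq_false, PySem.Chars.startswith_iff] at hO
  obtain ⟨t1, e1⟩ := h
  obtain ⟨t2, e2⟩ := hO
  rw [← e1] at e2
  simp at e2

-- Once spotted, A keeps appending until the first "Observation" line.
theorem pv_loop_spotted (n : Int) (lines : List String) (count : Int) (acc : List String) :
    pvAILoop n lines count true acc = acc.reverse ++ lines.take (pvFindObs lines) := by
  induction lines generalizing count acc with
  | nil => simp [pvAILoop]
  | cons l rest ih =>
    by_cases hO : PySem.Chars.startswith l.toList ['O', 'b', 's', 'e', 'r', 'v', 'a', 't', 'i', 'o', 'n'] = true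
    · simp [pvAILoop, pvFindObs, hO]
    · simp only [Bool.not_eq_true] at hO
      simp [pvAILoop, pvFindObs, hO, ih]

-- If the nth "Action Input:" never occurs, A appends every line.
theorem pv_loop_none (n : Int) (lines : List String) (count : Int) (acc : List String)
    (h : pvFindNth n lines count = none) :
    pvAILoop n lines count false acc = acc.reverse ++ lines := by
  induction lines generalizing count acc with
  | nil => simp [pvAILoop]
  | cons l rest ih =>
    by_cases hAI : PySem.Chars.startswith l.toList ['A', 'c', 't', 'i', 'o', 'n', ' ', 'I', 'n', 'p', 'u', 't', ':'] = true
    · by_cases hn : count + 1 = n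
      · simp [pvFindNth, hAI, hn] at h
      · simp only [pvFindNth] at h
        simp [hAI, hn, Option.map_eq_none_iff] at h
        simp [pvAILoop, hAI, hn, ih _ _ h]
    · simp only [Bool.not_eq_true] at hAI
      simp only [pvFindNth] at h
      simp [hAI, Option.map_eq_none_iff] at h
      simp [pvAILoop, hAI, ih _ _ h]

-- If the nth "Action Input:" is at index i, A yields the prefix up to the first
-- "Observation" at or after i.
theorem pv_loop_some (n : Int) (lines : List String) (count : Int) (acc : List String) (i : Nat)
    (h : pvFindNth n lines count = some i) :
    pvAILoop n lines count false acc = acc.reverse ++ lines.take (i + pvFindObs (lines.drop i)) := by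
  induction lines generalizing count acc i with
  | nil => simp [pvFindNth] at h
  | cons l rest ih =>
    by_cases hAI : PySem.Chars.startswith l.toList ['A', 'c', 't', 'i', 'o', 'n', ' ', 'I', 'n', 'p', 'u', 't', ':'] = true
    · by_cases hn : count + 1 = n
      · have hi : i = 0 := by simp [pvFindNth, hAI, hn] at h; omega
        subst hi
        have hO := pv_ai_not_obs l.toList hAI
        simp [pvAILoop, pvFindObs, hAI, hn, hO, pv_loop_spotted]
      · simp only [pvFindNth] at h
        simp [hAI, hn, Option.map_eq_some_iff] at h
        obtain ⟨i', hi', rfl⟩ := h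
        rw [show i' + 1 + pvFindObs (List.drop (i' + 1) (l :: rest)) =
              (i' + pvFindObs (List.drop i' rest)) + 1 by simp [List.drop_succ_cons]; omega]
        simp [pvAILoop, hAI, hn, ih _ _ _ hi', List.take_succ_cons]
    · simp only [Bool.not_eq_true] at hAI
      simp only [pvFindNth] at h
      simp [hAI, Option.map_eq_some_iff] at h
      obtain ⟨i', hi', rfl⟩ := h
      rw [show i' + 1 + pvFindObs (List.drop (i' + 1) (l :: rest)) =
            (i' + pvFindObs (List.drop i' rest)) + 1 by simp [List.drop_succ_cons]; omega]
      simp [pvAILoop, hAI, ih _ _ _ hi', List.take_succ_cons]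

-- With n ≤ count the counter can never hit n.
theorem pv_findNth_none_of_le (n : Int) (lines : List String) (count : Int) (hn : n ≤ count) :
    pvFindNth n lines count = none := by
  induction lines generalizing count with
  | nil => rfl
  | cons l rest ih =>
    by_cases hAI : PySem.Chars.startswith l.toList ['A', 'c', 't', 'i', 'o', 'n', ' ', 'I', 'n', 'p', 'u', 't', ':'] = true
    · simp [pvFindNth, hAI, ih (count + 1) (by omega), show ¬ (count + 1 = n) by omega]
    · simp only [Bool.not_eq_true] at hAI
      simp [pvFindNth, hAI, ih count hn]

-- ===== VERDICT (by name: the statement is the Claim_ definition above) =====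
theorem extract_from_nth_action_input_spec : Claim_equal_extract_from_nth_action_input := by
  intro text n _
  unfold Spec_extract_from_nth_action_input extract_from_nth_action_input extract_from_nth_action_input_alt
  simp only []
  by_cases h1 : 1 ≤ n
  · rw [if_pos h1]
    cases heq : pvFindNth n (PySem.Str.splitlines text) 0 with
    | none => rw [pv_loop_none n _ 0 [] heq]; simp
    | some i => rw [pv_loop_some n _ 0 [] i heq]; simp
  · rw [if_neg h1]
    rw [pv_loop_none n _ 0 [] (pv_findNth_none_of_le n _ 0 (by omega))]
    simp
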